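-- pv_equiv track=rewrite | github.com/Watts-Lab/team_comm_tools | src/team_comm_tools/utils/check_embeddings.py | fix_abbreviations
-- ===== SOURCE A (Python) =====
-- def fix_abbreviations(dicTerm: str) -> str:
--     """
--     Helper function to fix abbreviations with punctuations.
--     src: https://github.com/ryanboyd/ContentCoder-Py/blob/main/ContentCodingDictionary.py#L714
--
--     This function goes over a list of hardcoded exceptions for the tokenizer / sentence parser
--     built into LIWC so that it doesn't convert them into separate strings
--     (e.g., we want "i.e." to not be seen as two  words and two sentences [i, e]).
--
--     :param dicTerm: The lexicon term
--     :type dicTerm: str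
--
--     :return: dicTerm
--     :rtype: str
--     """
--
--     AbbreviationList = ['ie.', 'i.e.', 'eg.', 'e.g.', 'vs.', 'ph.d.', 'phd.', 'm.d.', 'd.d.s.', 'b.a.',
--                     'b.s.', 'm.s.', 'u.s.a.', 'u.s.', 'u.t.', 'attn.', 'prof.', 'mr.', 'dr.', 'mrs.',
--                     'ms.', 'a.i.', 'a.g.i.', 'tl;dr', 't.t', 't_t']
--     AbbreviationDict = {}
--     for item in AbbreviationList:
--         itemClean = item.replace('.', '-').replace(';', '-').replace('_', '-')
--
--         if len(itemClean) > 2 and itemClean.endswith('-'):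
--             numTrailers = len(itemClean)
--             itemClean = itemClean.strip('-')
--             numTrailers = numTrailers - len(itemClean)
--             itemClean = itemClean[:-1] + ''.join(['-'] * numTrailers) + itemClean[-1:]
--
--         AbbreviationDict[item] = itemClean
--         AbbreviationDict[item + ','] = itemClean
--
--     if dicTerm in AbbreviationDict.keys():
--         return AbbreviationDict[dicTerm]
--     else:
--         return dicTerm
-- ===== SOURCE B (Python) =====
-- # Precomputed table of final cleaned forms; no dash-repositioning transform at runtime.
-- CLEANED = {
--     'ie.': 'i-e', 'i.e.': 'i--e', 'eg.': 'e-g', 'e.g.': 'e--g', 'vs.': 'v-s',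
--     'ph.d.': 'ph--d', 'phd.': 'ph-d', 'm.d.': 'm--d', 'd.d.s.': 'd-d--s',
--     'b.a.': 'b--a', 'b.s.': 'b--s', 'm.s.': 'm--s', 'u.s.a.': 'u-s--a',
--     'u.s.': 'u--s', 'u.t.': 'u--t', 'attn.': 'att-n', 'prof.': 'pro-f',
--     'mr.': 'm-r', 'dr.': 'd-r', 'mrs.': 'mr-s', 'ms.': 'm-s',
--     'a.i.': 'a--i', 'a.g.i.': 'a-g--i', 'tl;dr': 'tl-dr', 't.t': 't-t', 't_t': 't-t',
-- }
--
-- def fix_abbreviations(dicTerm: str) -> str: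
--     key = dicTerm[:-1] if dicTerm.endswith(',') else dicTerm
--     return CLEANED.get(key, dicTerm)
-- ===== Notes on version B (the rewrite author's own statement) =====
-- stated objective: simpler
-- what changed: A builds the 52-entry mapping at runtime by running a dash-repositioning string transform over every abbreviation and then looks the term up; B contains no transform code at all: the 26 cleaned forms are a precomputed literal table, and the lookup key is dicTerm with one trailing comma stripped when present.
import Mathlib
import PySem

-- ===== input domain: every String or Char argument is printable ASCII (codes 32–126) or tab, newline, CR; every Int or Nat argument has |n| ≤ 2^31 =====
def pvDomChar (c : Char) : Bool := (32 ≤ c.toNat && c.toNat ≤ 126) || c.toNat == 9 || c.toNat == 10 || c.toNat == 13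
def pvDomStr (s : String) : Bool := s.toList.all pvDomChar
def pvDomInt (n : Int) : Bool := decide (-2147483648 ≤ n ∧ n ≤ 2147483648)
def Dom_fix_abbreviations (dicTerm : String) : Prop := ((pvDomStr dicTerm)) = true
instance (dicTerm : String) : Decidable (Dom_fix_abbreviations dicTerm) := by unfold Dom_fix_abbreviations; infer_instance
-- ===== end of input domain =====

-- B replaces A's runtime dash-repositioning transform and 52-entry dict build by a
-- precomputed literal table of the 26 cleaned forms plus a strip-one-trailing-comma
-- lookup (objective: simpler; no transform code runs).

-- ===== PORT A =====
-- A-side helpers: the hardcoded list and A's dict-building loop, hoisted (they do not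
-- depend on dicTerm; the loop body is the literal transliteration of A's).
def pvAbbreviationList : List String :=
  ["ie.", "i.e.", "eg.", "e.g.", "vs.", "ph.d.", "phd.", "m.d.", "d.d.s.", "b.a.",
   "b.s.", "m.s.", "u.s.a.", "u.s.", "u.t.", "attn.", "prof.", "mr.", "dr.", "mrs.",
   "ms.", "a.i.", "a.g.i.", "tl;dr", "t.t", "t_t"]

def pvAbbreviationDict : PySem.Dict String String :=
  pvAbbreviationList.foldl
    (fun d item =>
      let itemClean := PySem.Str.replace (PySem.Str.replace (PySem.Str.replace item "." "-") ";" "-") "_" "-"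
      let itemClean :=
        if 2 < PySem.Str.len itemClean ∧ PySem.Str.endswith itemClean "-" = true then
          let numTrailers := PySem.Str.len itemClean
          let itemClean' := PySem.Str.stripChars itemClean "-"
          let numTrailers := numTrailers - PySem.Str.len itemClean'
          PySem.Str.slice itemClean' none (some (-1))
            ++ PySem.Str.join "" (List.replicate numTrailers.toNat "-")
            ++ PySem.Str.slice itemClean' (some (-1)) none
        else itemClean
      (d.insert item itemClean).insert (item ++ ",") itemClean)
    PySem.Dict.empty

def fix_abbreviations (dicTerm : String) : String :=
  if pvAbbreviationDict.contains dicTerm = true then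
    pvAbbreviationDict.getD dicTerm dicTerm   -- subscript guarded by the membership test, so getD is exact
  else dicTerm

-- ===== PORT B =====
-- B-side helper: the precomputed literal table CLEANED of Source B.
def pvCleanTable : PySem.Dict String String :=
  PySem.Dict.ofList
    [("ie.", "i-e"), ("i.e.", "i--e"), ("eg.", "e-g"), ("e.g.", "e--g"), ("vs.", "v-s"),
     ("ph.d.", "ph--d"), ("phd.", "ph-d"), ("m.d.", "m--d"), ("d.d.s.", "d-d--s"),
     ("b.a.", "b--a"), ("b.s.", "b--s"), ("m.s.", "m--s"), ("u.s.a.", "u-s--a"),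
     ("u.s.", "u--s"), ("u.t.", "u--t"), ("attn.", "att-n"), ("prof.", "pro-f"),
     ("mr.", "m-r"), ("dr.", "d-r"), ("mrs.", "mr-s"), ("ms.", "m-s"),
     ("a.i.", "a--i"), ("a.g.i.", "a-g--i"), ("tl;dr", "tl-dr"), ("t.t", "t-t"), ("t_t", "t-t")]

def fix_abbreviations_alt (dicTerm : String) : String :=
  let key := if PySem.Str.endswith dicTerm "," = true
             then PySem.Str.slice dicTerm none (some (-1)) else dicTerm
  pvCleanTable.getD key dicTerm

-- ===== PRECONDITION & SPEC =====
def Spec_fix_abbreviations (dicTerm : String) (out : String) : Prop := out = fix_abbreviations_alt dicTerm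
instance (dicTerm : String) (out : String) : Decidable (Spec_fix_abbreviations dicTerm out) := by unfold Spec_fix_abbreviations; infer_instance

-- ===== CLAIM (what is proved, stated in full; the proofs are below) =====
def Claim_equal_fix_abbreviations : Prop := ∀ (dicTerm : String), Dom_fix_abbreviations dicTerm → Spec_fix_abbreviations dicTerm (fix_abbreviations dicTerm)

-- ===== LEMMAS AND PROOFS =====

-- the 52 keys of A's dict, in insertion order
def pvKeys : List String :=
  ["ie.", "ie.,", "i.e.", "i.e.,", "eg.", "eg.,", "e.g.", "e.g.,", "vs.", "vs.,",
   "ph.d.", "ph.d.,", "phd.", "phd.,", "m.d.", "m.d.,", "d.d.s.", "d.d.s.,",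
   "b.a.", "b.a.,", "b.s.", "b.s.,", "m.s.", "m.s.,", "u.s.a.", "u.s.a.,",
   "u.s.", "u.s.,", "u.t.", "u.t.,", "attn.", "attn.,", "prof.", "prof.,",
   "mr.", "mr.,", "dr.", "dr.,", "mrs.", "mrs.,", "ms.", "ms.,",
   "a.i.", "a.i.,", "a.g.i.", "a.g.i.,", "tl;dr", "tl;dr,", "t.t", "t.t,", "t_t", "t_t,"]

set_option maxRecDepth 10000 in
theorem pv_keys_eq : pvAbbreviationDict.keys = pvKeys := by decide

set_option maxRecDepth 10000 in
theorem pv_table_keys_eq : pvCleanTable.keys = pvAbbreviationList := by decide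

theorem pv_items_in_keys : ∀ it ∈ pvAbbreviationList, it ∈ pvKeys ∧ it ++ "," ∈ pvKeys := by decide

set_option maxRecDepth 40000 in
theorem pv_mem_agree : ∀ k ∈ pvKeys, fix_abbreviations k = fix_abbreviations_alt k := by decide

theorem pv_endswith_comma (s : String) (h : PySem.Str.endswith s "," = true) :
    String.ofList s.toList.dropLast ++ "," = s := by
  rw [PySem.Str.endswith_eq, PySem.Chars.endswith_iff] at h
  obtain ⟨t, ht⟩ := h
  apply String.toList_injective
  simp [← ht]

theorem pv_slice_neg_one (s : String) :
    PySem.Str.slice s none (some (-1)) = String.ofList s.toList.dropLast := by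
  simp [PySem.Str.slice, PySem.List.slice_to_neg_one]

-- ===== VERDICT (by name: the statement is the Claim_ definition above) =====
theorem fix_abbreviations_spec : Claim_equal_fix_abbreviations := by
  intro s _
  unfold Spec_fix_abbreviations
  by_cases hs : s ∈ pvKeys
  · exact pv_mem_agree s hs
  · have hA : fix_abbreviations s = s := by
      unfold fix_abbreviations
      rw [if_neg]
      intro hc
      exact hs (pv_keys_eq ▸ (PySem.Dict.contains_iff_mem_keys _ _).mp hc)
    have hB : fix_abbreviations_alt s = s := by
      unfold fix_abbreviations_alt
      by_cases hcomma : PySem.Str.endswith s "," = true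
      · simp only [hcomma, if_pos]
        apply PySem.Dict.getD_of_not_contains
        rw [Bool.eq_false_iff]
        intro hc
        have hk : PySem.Str.slice s none (some (-1)) ∈ pvAbbreviationList :=
          pv_table_keys_eq ▸ (PySem.Dict.contains_iff_mem_keys _ _).mp hc
        have := (pv_items_in_keys _ hk).2
        rw [pv_slice_neg_one, pv_endswith_comma s hcomma] at this
        exact hs this
      · simp only [hcomma, if_neg, Bool.false_eq_true, not_false_iff]
        apply PySem.Dict.getD_of_not_contains
        rw [Bool.eq_false_iff]
        intro hc
        exact hs (pv_items_in_keys _ (pv_table_keys_eq ▸ (PySem.Dict.contains_iff_mem_keys _ _).mp hc)).1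
    rw [hA, hB]
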